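-- pv_equiv track=rewrite | github.com/protector-project/TextPlatform | get_locations.py | match_locations
-- ===== SOURCE A (Python) =====
-- def match_locations(users2match, location_2match):
--     users_found = dict()
--     users_notfound = dict()
--     for u in users2match:
--         found = 0
--         end = 0
--         while found == 0 and end == 0:
--             for k in location_2match:
--                 if k != '':
--                     if found == 0:
--                         if type(users2match[u]) != list:
--                             if k in users2match[u].lower():
--                                 found = 1
--                                 users_found[u] = location_2match[k]
--             end = 1
--
--         if found == 0:
--             users_notfound[u] = users2match[u]
--
--     return(users_found, users_notfound)
-- ===== SOURCE B (Python) =====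
-- def match_locations(users2match, location_2match):
--     # Key-outer traversal: walk the location keys once, matching all still-pending
--     # users per key and removing them, instead of rescanning every key per user.
--     keys = [k for k in location_2match if k != '']
--     pending = {u: v.lower() for u, v in users2match.items()}
--     match = {}
--     for k in keys:
--         if not pending:
--             break
--         loc = location_2match[k]
--         hit = [u for u, t in pending.items() if k in t]
--         for u in hit:
--             match[u] = loc
--             del pending[u]
--     found = {u: match[u] for u in users2match if u in match}
--     notfound = {u: v for u, v in users2match.items() if u not in match}
--     return (found, notfound)
-- ===== Notes on version B (the rewrite author's own statement) =====
-- stated objective: alternative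
-- what changed: B inverts the loop nesting: instead of rescanning every location key per user, it walks the non-empty location keys once, matching and removing all still-pending users per key (stopping early when none remain), then rebuilds the two result dicts in user order.
import Mathlib
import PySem

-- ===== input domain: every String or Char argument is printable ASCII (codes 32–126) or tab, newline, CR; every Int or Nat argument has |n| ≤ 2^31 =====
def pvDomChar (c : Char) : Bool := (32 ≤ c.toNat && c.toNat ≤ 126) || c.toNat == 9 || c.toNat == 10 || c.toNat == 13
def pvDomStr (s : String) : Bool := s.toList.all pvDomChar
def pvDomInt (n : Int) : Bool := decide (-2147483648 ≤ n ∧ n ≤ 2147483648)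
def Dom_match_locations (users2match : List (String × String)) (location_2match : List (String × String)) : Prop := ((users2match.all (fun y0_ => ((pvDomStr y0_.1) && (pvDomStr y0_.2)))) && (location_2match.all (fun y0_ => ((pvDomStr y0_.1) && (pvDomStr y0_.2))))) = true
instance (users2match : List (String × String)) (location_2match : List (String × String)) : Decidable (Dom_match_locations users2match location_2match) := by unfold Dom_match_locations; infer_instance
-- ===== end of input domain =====

-- B replaces A's per-user rescan of every location key by a single key-outer pass that
-- matches and removes all still-pending users per key (objective: alternative traversal
-- order with early removal). Both programs receive dicts; the return value alone is compared.

-- ===== PORT A =====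
-- A's `while found == 0 and end == 0:` body sets `end = 1`, so the while body runs exactly
-- once; it is ported as that single pass. `type(users2match[u]) != list` is always true here
-- (the values are strings), so the branch condition is ported as always taken.
def aInner (L : PySem.Dict String String) (u s : String)
    (p : Nat × PySem.Dict String String) (k : String) : Nat × PySem.Dict String String :=
  if k ≠ "" then
    if p.1 == 0 then
      if PySem.Str.isIn k (PySem.Str.lower s) then (1, p.2.insert u (L.getD k "")) else p
    else p
  else p

def aUser (U L : PySem.Dict String String)
    (st : PySem.Dict String String × PySem.Dict String String) (u : String) :
    PySem.Dict String String × PySem.Dict String String :=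
  let inner := L.keys.foldl (aInner L u (U.getD u "")) (0, st.1)
  if inner.1 == 0 then (inner.2, st.2.insert u (U.getD u "")) else (inner.2, st.2)

def match_locations (users2match : List (String × String)) (location_2match : List (String × String)) : (List (String × String)) × (List (String × String)) :=
  let U := PySem.Dict.ofList users2match
  let L := PySem.Dict.ofList location_2match
  let res := U.keys.foldl (aUser U L) (PySem.Dict.empty, PySem.Dict.empty)
  (res.1.items, res.2.items)

-- ===== PORT B =====
def bKeyStep (L : PySem.Dict String String)
    (st : PySem.Dict String String × List (String × String)) (k : String) :
    PySem.Dict String String × List (String × String) :=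
  if st.2.isEmpty then st
  else
    let loc := L.getD k ""
    let hit := st.2.filter (fun p => PySem.Str.isIn k p.2)
    (hit.foldl (fun m p => m.insert p.1 loc) st.1,
     st.2.filter (fun p => !(PySem.Str.isIn k p.2)))

def match_locations_alt (users2match : List (String × String)) (location_2match : List (String × String)) : (List (String × String)) × (List (String × String)) :=
  let U := PySem.Dict.ofList users2match
  let L := PySem.Dict.ofList location_2match
  let keys := L.keys.filter (fun k => k ≠ "")
  let pending := U.items.map (fun p => (p.1, PySem.Str.lower p.2))
  let mtch := (keys.foldl (bKeyStep L) (PySem.Dict.empty, pending)).1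
  let found := (U.items.filter (fun p => (mtch.get? p.1).isSome)).map
      (fun p => (p.1, mtch.getD p.1 ""))
  let notfound := U.items.filter (fun p => (mtch.get? p.1).isNone)
  (found, notfound)

-- ===== PRECONDITION & SPEC =====
def Spec_match_locations (users2match : List (String × String)) (location_2match : List (String × String)) (out : (List (String × String)) × (List (String × String))) : Prop := out = match_locations_alt users2match location_2match
instance (users2match : List (String × String)) (location_2match : List (String × String)) (out : (List (String × String)) × (List (String × String))) : Decidable (Spec_match_locations users2match location_2match out) := by unfold Spec_match_locations; infer_instance

-- ===== CLAIM (what is proved, stated in full; the proofs are below) =====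
def Claim_equal_match_locations : Prop := ∀ (users2match : List (String × String)) (location_2match : List (String × String)), Dom_match_locations users2match location_2match → Spec_match_locations users2match location_2match (match_locations users2match location_2match)

-- ===== LEMMAS AND PROOFS =====

-- the first non-empty location key occurring in t.lower(), if any
def fKey (L : PySem.Dict String String) (t : String) : Option String :=
  L.keys.find? (fun k => (!decide (k = "")) && PySem.Chars.isIn k.toList (PySem.Chars.lower t.toList))

-- canonical value both programs compute
def canonF (L : PySem.Dict String String) (items : List (String × String)) : List (String × String) :=
  items.filterMap (fun p => (fKey L p.2).map (fun k => (p.1, L.getD k "")))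

def canonN (L : PySem.Dict String String) (items : List (String × String)) : List (String × String) :=
  items.filter (fun p => (fKey L p.2).isNone)

-- A's inner loop is a no-op once the flag is set
lemma inner_one (L : PySem.Dict String String) (u s : String) :
    ∀ (ks : List String) (d : PySem.Dict String String),
      ks.foldl (aInner L u s) (1, d) = (1, d) := by
  intro ks
  induction ks with
  | nil => intro d; rfl
  | cons k ks ih =>
    intro d
    have h : aInner L u s (1, d) k = (1, d) := by
      unfold aInner; split <;> rfl
    simp [List.foldl_cons, h, ih]

-- A's inner loop computes the first matching non-empty key
lemma inner_char (L : PySem.Dict String String) (u s : String) :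
    ∀ (ks : List String) (d : PySem.Dict String String),
      ks.foldl (aInner L u s) (0, d) =
        match ks.find? (fun k => (!decide (k = "")) && PySem.Chars.isIn k.toList (PySem.Chars.lower s.toList)) with
        | none => (0, d)
        | some k => (1, d.insert u (L.getD k "")) := by
  intro ks
  induction ks with
  | nil => intro d; rfl
  | cons k ks ih =>
    intro d
    by_cases hk : k = ""
    · subst hk
      have h1 : aInner L u s (0, d) "" = (0, d) := by unfold aInner; simp
      simp [List.foldl_cons, h1, ih]
    · by_cases hin : PySem.Chars.isIn k.toList (PySem.Chars.lower s.toList) = true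
      · have h1 : aInner L u s (0, d) k = (1, d.insert u (L.getD k "")) := by
          unfold aInner; simp [hk, hin]
        simp [List.foldl_cons, h1, inner_one, List.find?_cons, hk, hin]
      · have h1 : aInner L u s (0, d) k = (0, d) := by
          unfold aInner; simp [hk, hin]
        simp [List.foldl_cons, h1, List.find?_cons, hk, hin, ih]

lemma aUser_eq (U L : PySem.Dict String String)
    (st : PySem.Dict String String × PySem.Dict String String) (u : String) :
    aUser U L st u =
      match fKey L (U.getD u "") with
      | none => (st.1, st.2.insert u (U.getD u ""))
      | some k => (st.1.insert u (L.getD k ""), st.2) := by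
  unfold aUser fKey
  rw [inner_char]
  cases L.keys.find? (fun k => (!decide (k = "")) && PySem.Chars.isIn k.toList (PySem.Chars.lower (U.getD u "").toList)) <;> simp

-- A's outer loop over fresh distinct users appends the canonical entries
lemma outer_items (L U : PySem.Dict String String) :
    ∀ (l : List (String × String)) (d1 d2 : PySem.Dict String String),
      (∀ p ∈ l, U.getD p.1 "" = p.2) →
      (l.map Prod.fst).Nodup →
      (∀ p ∈ l, d1.contains p.1 = false) →
      (∀ p ∈ l, d2.contains p.1 = false) →
      ((l.map Prod.fst).foldl (aUser U L) (d1, d2)).1.items = d1.items ++ canonF L l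
      ∧ ((l.map Prod.fst).foldl (aUser U L) (d1, d2)).2.items = d2.items ++ canonN L l := by
  intro l
  induction l with
  | nil => intro d1 d2 _ _ _ _; simp [canonF, canonN]
  | cons p l ih =>
    intro d1 d2 hget hnd h1 h2
    have hget_p : U.getD p.1 "" = p.2 := hget p (by simp)
    have hstep := aUser_eq U L (d1, d2) p.1
    rw [hget_p] at hstep
    rw [List.map_cons, List.nodup_cons] at hnd
    have hne : ∀ q ∈ l, q.1 ≠ p.1 := by
      intro q hq heq
      exact hnd.1 (heq ▸ List.mem_map_of_mem hq)
    cases hfk : fKey L p.2 with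
    | some k =>
      rw [hfk] at hstep
      have hc1 : d1.contains p.1 = false := h1 p (by simp)
      have hitems : (d1.insert p.1 (L.getD k "")).items = d1.items ++ [(p.1, L.getD k "")] :=
        PySem.Dict.items_insert_of_not_contains _ _ hc1
      have ih' := ih (d1.insert p.1 (L.getD k "")) d2
        (fun q hq => hget q (List.mem_cons_of_mem _ hq))
        hnd.2
        (fun q hq => by
          rw [PySem.Dict.contains_insert]
          simp [h1 q (List.mem_cons_of_mem _ hq), hne q hq])
        (fun q hq => h2 q (List.mem_cons_of_mem _ hq))
      constructor
      · rw [List.map_cons, List.foldl_cons, hstep, ih'.1, hitems]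
        simp [canonF, hfk]
      · rw [List.map_cons, List.foldl_cons, hstep, ih'.2]
        simp [canonN, hfk]
    | none =>
      rw [hfk] at hstep
      have hc2 : d2.contains p.1 = false := h2 p (by simp)
      have hitems : (d2.insert p.1 p.2).items = d2.items ++ [(p.1, p.2)] :=
        PySem.Dict.items_insert_of_not_contains _ _ hc2
      have ih' := ih d1 (d2.insert p.1 p.2)
        (fun q hq => hget q (List.mem_cons_of_mem _ hq))
        hnd.2
        (fun q hq => h1 q (List.mem_cons_of_mem _ hq))
        (fun q hq => by
          rw [PySem.Dict.contains_insert]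
          simp [h2 q (List.mem_cons_of_mem _ hq), hne q hq])
      constructor
      · rw [List.map_cons, List.foldl_cons, hstep, ih'.1]
        simp [canonF, hfk]
      · rw [List.map_cons, List.foldl_cons, hstep, ih'.2, hitems]
        simp [canonN, hfk]

lemma A_eq (u l : List (String × String)) :
    match_locations u l =
      (canonF (PySem.Dict.ofList l) (PySem.Dict.ofList u).items,
       canonN (PySem.Dict.ofList l) (PySem.Dict.ofList u).items) := by
  unfold match_locations
  dsimp only
  have hnd : ((PySem.Dict.ofList u).items.map Prod.fst).Nodup := PySem.Dict.nodup_keys_ofList u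
  have h := outer_items (PySem.Dict.ofList l) (PySem.Dict.ofList u) (PySem.Dict.ofList u).items
    PySem.Dict.empty PySem.Dict.empty
    (fun p hp => PySem.Dict.getD_of_mem_items _ hp (PySem.Dict.nodup_keys_ofList u) "")
    hnd (fun p _ => PySem.Dict.contains_empty _) (fun p _ => PySem.Dict.contains_empty _)
  have hkeys : (PySem.Dict.ofList u).keys = (PySem.Dict.ofList u).items.map Prod.fst := rfl
  rw [hkeys]
  simp only [h.1, h.2]
  simp [show (PySem.Dict.empty : PySem.Dict String String).items = [] from rfl]

-- distinct first components determine the second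
lemma fst_of_nodup : ∀ (l : List (String × String)), (l.map Prod.fst).Nodup →
    ∀ {x t t' : String}, (x, t) ∈ l → (x, t') ∈ l → t = t' := by
  intro l
  induction l with
  | nil => intro _ x t t' h1 _; simp at h1
  | cons p l ih =>
    intro hnd x t t' h1 h2
    rw [List.map_cons, List.nodup_cons] at hnd
    rcases List.mem_cons.mp h1 with h1 | h1 <;> rcases List.mem_cons.mp h2 with h2 | h2
    · exact congrArg Prod.snd (h1.trans h2.symm)
    · exfalso; apply hnd.1; rw [← h1]; simpa using List.mem_map_of_mem h2 (f := Prod.fst)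
    · exfalso; apply hnd.1; rw [← h2]; simpa using List.mem_map_of_mem h1 (f := Prod.fst)
    · exact ih hnd.2 h1 h2

-- a fold of inserts with one common value
lemma insert_fold_get? (v : String) : ∀ (l : List (String × String)) (m : PySem.Dict String String) (x : String),
    (l.foldl (fun m p => m.insert p.1 v) m).get? x
      = if x ∈ l.map Prod.fst then some v else m.get? x := by
  intro l
  induction l with
  | nil => intro m x; simp
  | cons p l ih =>
    intro m x
    rw [List.foldl_cons, ih, List.map_cons]
    by_cases hx : x ∈ l.map Prod.fst
    · simp [hx]
    · by_cases hxp : x = p.1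
      · simp [hx, hxp, PySem.Dict.get?_insert_self]
      · simp [hx, PySem.Dict.get?_insert, hxp]

-- B's key loop never touches a user that is not pending
lemma bfold_untouched (L : PySem.Dict String String) :
    ∀ (ks : List String) (m : PySem.Dict String String) (pend : List (String × String)) (x : String),
      x ∉ pend.map Prod.fst →
      ((ks.foldl (bKeyStep L) (m, pend)).1).get? x = m.get? x := by
  intro ks
  induction ks with
  | nil => intro m pend x _; rfl
  | cons k ks ih =>
    intro m pend x hx
    by_cases he : pend.isEmpty
    · have hstep : bKeyStep L (m, pend) k = (m, pend) := by unfold bKeyStep; simp [he]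
      rw [List.foldl_cons, hstep, ih m pend x hx]
    · have hstep : bKeyStep L (m, pend) k =
        ((pend.filter (fun p => PySem.Str.isIn k p.2)).foldl
            (fun m p => m.insert p.1 (L.getD k "")) m,
          pend.filter (fun p => !(PySem.Str.isIn k p.2))) := by
        unfold bKeyStep; simp [he]
    
      have hsub : ∀ (q : String × String → Bool), x ∉ (pend.filter q).map Prod.fst := by
        intro q hmem
        rcases List.mem_map.mp hmem with ⟨p, hp, hp1⟩
        exact hx (hp1 ▸ List.mem_map_of_mem (List.mem_of_mem_filter hp) (f := Prod.fst))
      rw [List.foldl_cons, hstep, ih _ _ x (hsub _), insert_fold_get?, if_neg (hsub _)]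

-- B's key loop gives each pending user the first matching key's location
lemma bfold_get? (L : PySem.Dict String String) :
    ∀ (ks : List String) (m : PySem.Dict String String) (pend : List (String × String)),
      (pend.map Prod.fst).Nodup →
      ∀ (x t : String), (x, t) ∈ pend →
      ((ks.foldl (bKeyStep L) (m, pend)).1).get? x =
        match ks.find? (fun k => PySem.Chars.isIn k.toList t.toList) with
        | some k => some (L.getD k "")
        | none => m.get? x := by
  intro ks
  induction ks with
  | nil => intro m pend _ x t _; rfl
  | cons k ks ih =>
    intro m pend hnd x t hmem
    have he : pend.isEmpty = false := by
      cases pend with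
      | nil => simp at hmem
      | cons q l => rfl
    have hstep : bKeyStep L (m, pend) k =
        ((pend.filter (fun p => PySem.Str.isIn k p.2)).foldl
            (fun m p => m.insert p.1 (L.getD k "")) m,
          pend.filter (fun p => !(PySem.Str.isIn k p.2))) := by
      unfold bKeyStep; simp [he]
    rw [List.foldl_cons, hstep]
    have hsnd : ∀ (q : String × String) (qf : String × String → Bool),
        q ∈ pend.filter qf → q.1 = x → q.2 = t := by
      intro q qf hq hq1
      have hq' : (x, q.2) ∈ pend := by
        rw [← hq1]; simpa using List.mem_of_mem_filter hq
      exact fst_of_nodup pend hnd hq' hmem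
    by_cases hin : PySem.Chars.isIn k.toList t.toList = true
    · have hnot : x ∉ (pend.filter (fun p => !(PySem.Str.isIn k p.2))).map Prod.fst := by
        intro hmem'
        rcases List.mem_map.mp hmem' with ⟨q, hq, hq1⟩
        have hqt : q.2 = t := hsnd q _ hq hq1
        have h2 := (List.mem_filter.mp hq).2
        rw [hqt] at h2
        simp at h2
        exact absurd hin (by simp [h2])
      rw [bfold_untouched L ks _ _ x hnot, insert_fold_get?]
      have hx : x ∈ (pend.filter (fun p => PySem.Str.isIn k p.2)).map Prod.fst :=
        List.mem_map.mpr ⟨(x, t), List.mem_filter.mpr ⟨hmem, by simpa using hin⟩, rfl⟩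
      rw [if_pos hx, List.find?_cons_of_pos (by simpa using hin)]
    · have hmem' : (x, t) ∈ pend.filter (fun p => !(PySem.Str.isIn k p.2)) :=
        List.mem_filter.mpr ⟨hmem, by simpa using hin⟩
      have hnd' : ((pend.filter (fun p => !(PySem.Str.isIn k p.2))).map Prod.fst).Nodup :=
        hnd.sublist (List.Sublist.map Prod.fst List.filter_sublist)
      have hnot : x ∉ (pend.filter (fun p => PySem.Str.isIn k p.2)).map Prod.fst := by
        intro hmemh
        rcases List.mem_map.mp hmemh with ⟨q, hq, hq1⟩
        have hqt : q.2 = t := hsnd q _ hq hq1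
        have h2 := (List.mem_filter.mp hq).2
        rw [hqt] at h2
        simp at h2
        exact hin h2
      rw [ih _ _ hnd' x t hmem', insert_fold_get?,
        List.find?_cons_of_neg (by simpa using hin)]
      cases List.find? (fun k => PySem.Chars.isIn k.toList t.toList) ks with
      | some k' => rfl
      | none => rw [if_neg hnot]

-- find? over a filtered list
lemma find?_filter (q pred : String → Bool) :
    ∀ (l : List String), (l.filter q).find? pred = l.find? (fun k => q k && pred k) := by
  intro l
  induction l with
  | nil => rfl
  | cons k l ih =>
    by_cases hq : q k = true
    · by_cases hp : pred k = true
      · simp [hq, hp, List.find?_cons]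
      · simp only [List.filter_cons, hq, if_pos]
        simp [List.find?_cons, hp, hq, ih]
    · simp [List.filter_cons, hq, List.find?_cons, ih]

-- reading the two result lists off the match dictionary
lemma lists_of_get? :
    ∀ (l : List (String × String)) (m : PySem.Dict String String) (F : String × String → Option String),
      (∀ p ∈ l, m.get? p.1 = F p) →
      (l.filter (fun p => (m.get? p.1).isSome)).map (fun p => (p.1, (m.get? p.1).getD ""))
          = l.filterMap (fun p => (F p).map (fun w => (p.1, w)))
      ∧ l.filter (fun p => (m.get? p.1).isNone) = l.filter (fun p => (F p).isNone) := by
  intro l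
  induction l with
  | nil => intro m F _; simp
  | cons p l ih =>
    intro m F hF
    have hp := hF p (by simp)
    have ih' := ih m F (fun q hq => hF q (List.mem_cons_of_mem _ hq))
    cases hFp : F p with
    | some w =>
      rw [hFp] at hp
      constructor
      · simp [List.filter_cons, List.filterMap_cons, hp, hFp, ih'.1]
      · simp [List.filter_cons, hp, hFp, ih'.2]
    | none =>
      rw [hFp] at hp
      constructor
      · simp [List.filter_cons, List.filterMap_cons, hp, hFp, ih'.1]
      · simp [List.filter_cons, hp, hFp, ih'.2]

lemma B_eq (u l : List (String × String)) :
    match_locations_alt u l =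
      (canonF (PySem.Dict.ofList l) (PySem.Dict.ofList u).items,
       canonN (PySem.Dict.ofList l) (PySem.Dict.ofList u).items) := by
  unfold match_locations_alt
  dsimp only
  set U := PySem.Dict.ofList u with hU
  set L := PySem.Dict.ofList l with hL
  set pending := U.items.map (fun p => (p.1, PySem.Str.lower p.2)) with hpend
  set mtch := ((L.keys.filter (fun k => k ≠ "")).foldl (bKeyStep L)
      (PySem.Dict.empty, pending)).1 with hmtch
  have hndp : (pending.map Prod.fst).Nodup := by
    have hpk : pending.map Prod.fst = U.keys := by rw [hpend, List.map_map]; rfl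
    rw [hpk]; exact PySem.Dict.nodup_keys_ofList u
  have hget : ∀ p ∈ U.items, mtch.get? p.1 = (fKey L p.2).map (fun k => L.getD k "") := by
    intro p hp
    have hpmem : (p.1, PySem.Str.lower p.2) ∈ pending := List.mem_map_of_mem hp
    rw [hmtch, bfold_get? L _ _ _ hndp p.1 _ hpmem, find?_filter]
    have hpred : L.keys.find?
          (fun k => decide (k ≠ "") && PySem.Chars.isIn k.toList (PySem.Str.lower p.2).toList)
        = L.keys.find?
          (fun k => (!decide (k = "")) && PySem.Chars.isIn k.toList (PySem.Chars.lower p.2.toList)) := by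
      congr 1
      funext k
      simp
    rw [hpred]
    unfold fKey
    cases L.keys.find? (fun k => (!decide (k = "")) && PySem.Chars.isIn k.toList (PySem.Chars.lower p.2.toList)) with
    | some k => rfl
    | none => simp [PySem.Dict.get?_empty]
  obtain ⟨h1, h2⟩ := lists_of_get? U.items mtch (fun p => (fKey L p.2).map (fun k => L.getD k "")) hget
  simp only [PySem.Dict.getD_eq_get?_getD]
  rw [h1, h2, Prod.mk.injEq]
  refine ⟨?_, ?_⟩
  · unfold canonF
    congr 1
    funext p
    cases fKey L p.2 <;> rfl
  · unfold canonN
    congr 1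
    funext p
    cases fKey L p.2 <;> rfl

-- ===== VERDICT (by name: the statement is the Claim_ definition above) =====
theorem match_locations_spec : Claim_equal_match_locations := by
  intro u l _
  unfold Spec_match_locations
  rw [A_eq, B_eq]
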